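-- pv_equiv track=rewrite | github.com/ahmobini/mapsahr | hackerrank/noIdea!.py | happiness_production
-- ===== SOURCE A (Python) =====
-- def happiness_production(n,A,B):
--     for i in n:
--         if i in A:
--             yield 1
--         elif i in B:
--             yield -1
--         else:
--             yield 0
-- ===== SOURCE B (Python) =====
-- def happiness_production(n, A, B):
--     # Inverted control flow: index the positions of each value of n once, start
--     # from an all-zero output, then scan B writing -1 and A writing 1 into those
--     # positions (A written last so it wins on overlap, like A's if-before-elif).
--     # No per-element membership tests at all.
--     pos = {}
--     for j, x in enumerate(n):
--         pos.setdefault(x, []).append(j)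
--     out = [0] * len(n)
--     for v in B:
--         for j in pos.get(v, []):
--             out[j] = -1
--     for v in A:
--         for j in pos.get(v, []):
--             out[j] = 1
--     yield from out
-- ===== Notes on version B (the rewrite author's own statement) =====
-- stated objective: alternative
-- what changed: Inverts the control flow: instead of testing each element of n for membership in A and B, B indexes the positions of each value of n once, starts from an all-zero output array, and scans B then A writing -1/1 into the recorded positions (A last so it wins on overlap).
import Mathlib
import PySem

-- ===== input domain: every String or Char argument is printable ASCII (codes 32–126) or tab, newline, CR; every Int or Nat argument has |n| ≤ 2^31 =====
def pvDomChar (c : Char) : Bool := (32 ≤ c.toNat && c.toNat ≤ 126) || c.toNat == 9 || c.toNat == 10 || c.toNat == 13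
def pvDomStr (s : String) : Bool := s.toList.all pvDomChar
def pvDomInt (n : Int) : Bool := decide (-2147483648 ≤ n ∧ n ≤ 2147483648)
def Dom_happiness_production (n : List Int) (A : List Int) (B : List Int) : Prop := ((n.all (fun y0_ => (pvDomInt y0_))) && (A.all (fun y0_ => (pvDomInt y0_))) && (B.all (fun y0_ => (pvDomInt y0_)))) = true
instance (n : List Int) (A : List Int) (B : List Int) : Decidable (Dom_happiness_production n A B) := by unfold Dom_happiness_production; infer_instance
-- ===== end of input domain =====

-- B inverts the control flow: it indexes the positions of each value of n once, then scans B and A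
-- writing -1/1 into those positions of an all-zero output (A last, so it wins on overlap) — no
-- per-element membership tests; same yielded sequence as A.

-- ===== PORT A =====
-- A is a generator; its yields are collected in order: per element of n, membership test in A then B.
def happiness_production (n : List Int) (A : List Int) (B : List Int) : List Int :=
  n.foldl (fun acc i =>
    acc ++ [if i ∈ A then (1 : Int) else if i ∈ B then -1 else 0]) []

-- ===== PORT B =====
-- positions from enumerate are nonnegative valid indices, so `out[j] = score` is exactly
-- `o.set j.toNat score`.
def happiness_production_alt (n : List Int) (A : List Int) (B : List Int) : List Int :=
  let pos : PySem.Dict Int (List Int) :=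
    (PySem.List.enumerate n).foldl (fun d p => d.insert p.2 (d.getD p.2 [] ++ [p.1]))
      PySem.Dict.empty
  let out0 := List.replicate n.length (0 : Int)
  let outB := B.foldl (fun o v => (pos.getD v []).foldl (fun o j => o.set j.toNat (-1)) o) out0
  let outA := A.foldl (fun o v => (pos.getD v []).foldl (fun o j => o.set j.toNat 1) o) outB
  outA

-- ===== PRECONDITION & SPEC =====
def Spec_happiness_production (n : List Int) (A : List Int) (B : List Int) (out : List Int) : Prop := out = happiness_production_alt n A B
instance (n : List Int) (A : List Int) (B : List Int) (out : List Int) : Decidable (Spec_happiness_production n A B out) := by unfold Spec_happiness_production; infer_instance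

-- ===== CLAIM (what is proved, stated in full; the proofs are below) =====
def Claim_equal_happiness_production : Prop := ∀ (n : List Int) (A : List Int) (B : List Int), Dom_happiness_production n A B → Spec_happiness_production n A B (happiness_production n A B)

-- ===== LEMMAS AND PROOFS =====

-- the index list the position table stores under value v
def pvPosList (n : List Int) (v : Int) : List Int :=
  ((PySem.List.enumerate n).filter (fun p => p.2 == v)).map (·.1)

-- A's fold is a map
theorem pvFoldl_append_map (l : List Int) (f : Int → Int) (acc : List Int) :
    l.foldl (fun acc x => acc ++ [f x]) acc = acc ++ l.map f := by
  induction l generalizing acc with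
  | nil => simp
  | cons x xs ih => simp [ih]

theorem pvInsert_eq_modify (d : PySem.Dict Int (List Int)) (k : Int) (j : Int) :
    d.insert k (d.getD k [] ++ [j]) = d.modify k [] (· ++ [j]) := by
  simp [PySem.Dict.modify, PySem.Dict.getD, PySem.Dict.insert]

-- the position table: getD v [] = the (Int) indices of the occurrences of v in n, in order
theorem pvPos_getD (n : List Int) (v : Int) :
    (((PySem.List.enumerate n).foldl (fun d p => d.insert p.2 (d.getD p.2 [] ++ [p.1]))
        PySem.Dict.empty) : PySem.Dict Int (List Int)).getD v [] = pvPosList n v := by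
  rw [show ((PySem.List.enumerate n).foldl
        (fun (d : PySem.Dict Int (List Int)) p => d.insert p.2 (d.getD p.2 [] ++ [p.1]))
        PySem.Dict.empty)
      = (((PySem.List.enumerate n).map (fun p => (p.2, p.1))).foldl
        (fun (d : PySem.Dict Int (List Int)) q => d.modify q.1 [] (· ++ [q.2]))
        PySem.Dict.empty) by
    rw [List.foldl_map]; simp only [pvInsert_eq_modify]]
  rw [PySem.Dict.getD_foldl_modify_append]
  simp only [pvPosList, PySem.Dict.getD_empty, List.nil_append, List.filter_map, List.map_map]
  rfl

-- membership in the position list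
theorem pvMem_posList (n : List Int) (v : Int) (j : Int) :
    j ∈ pvPosList n v ↔ ∃ (m : Nat) (h : m < n.length), j = (m : Int) ∧ n[m] = v := by
  simp only [pvPosList, List.mem_map, List.mem_filter, PySem.List.mem_enumerate_iff]
  constructor
  · rintro ⟨p, ⟨⟨m, h, rfl⟩, hv⟩, rfl⟩
    exact ⟨m, h, by simpa using hv⟩
  · rintro ⟨m, h, rfl, hv⟩
    exact ⟨((m : Int), n[m]), ⟨⟨m, h, by simp⟩, by simpa using hv⟩, rfl⟩

theorem pvGetElem?_set (l : List Int) (i : Nat) (a : Int) (j : Nat) :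
    (l.set i a)[j]? = if i = j ∧ i < l.length then some a else l[j]? := by
  rw [List.getElem?_set]; split_ifs <;> simp_all <;> omega

-- one write pass over a list of indices
theorem pvSetFold_getElem? (js : List Int) (c : Int) (o : List Int) (k : Nat) :
    (js.foldl (fun o j => o.set j.toNat c) o)[k]?
      = if k < o.length ∧ ∃ j ∈ js, j.toNat = k then some c else o[k]? := by
  induction js generalizing o with
  | nil => simp
  | cons j js ih =>
    rw [List.foldl_cons, ih, List.length_set, pvGetElem?_set]
    by_cases hk : k < o.length
    · by_cases hj : j.toNat = k
      · simp [hk, hj]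
      · by_cases he : ∃ x ∈ js, x.toNat = k <;> simp [hk, hj, he]
    · by_cases hj : j.toNat = k <;> simp [hk, hj]

theorem pvSetFold_length (js : List Int) (c : Int) (o : List Int) :
    (js.foldl (fun o j => o.set j.toNat c) o).length = o.length := by
  induction js generalizing o with
  | nil => rfl
  | cons j js ih => rw [List.foldl_cons, ih, List.length_set]

-- the write condition of one value equals "n[k] is that value"
theorem pvCond_iff (n : List Int) (v : Int) (o : List Int) (k : Nat)
    (hlen : o.length = n.length) :
    (k < o.length ∧ ∃ j ∈ pvPosList n v, j.toNat = k) ↔ n[k]? = some v := by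
  constructor
  · rintro ⟨hk, j, hj, hjk⟩
    rcases (pvMem_posList n v j).1 hj with ⟨m, hm, rfl, hv⟩
    have : m = k := by omega
    subst this
    simp [List.getElem?_eq_getElem hm, hv]
  · intro h
    have hk : k < n.length := by
      by_contra hge
      rw [List.getElem?_eq_none (by omega)] at h; cases h
    have hv : n[k] = v := by
      rw [List.getElem?_eq_getElem hk] at h; exact Option.some.inj h
    exact ⟨by omega, (k : Int), (pvMem_posList n v _).2 ⟨k, hk, rfl, hv⟩, Int.toNat_natCast k⟩

-- one write pass over a list of values, through the position lists
theorem pvPassFold_getElem? (L : List Int) (n : List Int) (c : Int) (o : List Int) (k : Nat)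
    (hlen : o.length = n.length) :
    (L.foldl (fun o v => (pvPosList n v).foldl (fun o j => o.set j.toNat c) o) o)[k]?
      = if ∃ v ∈ L, n[k]? = some v then some c else o[k]? := by
  induction L generalizing o with
  | nil => simp
  | cons v L ih =>
    rw [List.foldl_cons, ih _ (by rw [pvSetFold_length]; exact hlen), pvSetFold_getElem?]
    simp only [pvCond_iff n v o k hlen]
    by_cases hv : n[k]? = some v
    · simp [hv]
    · by_cases he : ∃ w ∈ L, n[k]? = some w <;> simp [hv, he]

theorem pvPassFold_length (L : List Int) (n : List Int) (c : Int) (o : List Int) :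
    (L.foldl (fun o v => (pvPosList n v).foldl (fun o j => o.set j.toNat c) o) o).length
      = o.length := by
  induction L generalizing o with
  | nil => rfl
  | cons v L ih => rw [List.foldl_cons, ih, pvSetFold_length]

-- ===== VERDICT (by name: the statement is the Claim_ definition above) =====
theorem happiness_production_spec : Claim_equal_happiness_production := by
  intro n A B _
  unfold Spec_happiness_production happiness_production happiness_production_alt
  simp only [pvPos_getD]
  rw [pvFoldl_append_map, List.nil_append]
  have hlen0 : (List.replicate n.length (0 : Int)).length = n.length := by simp
  have hlenB : (B.foldl (fun o v => (pvPosList n v).foldl (fun o j => o.set j.toNat (-1)) o)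
      (List.replicate n.length (0 : Int))).length = n.length := by
    rw [pvPassFold_length]; exact hlen0
  apply List.ext_getElem?
  intro k
  rw [List.getElem?_map,
      pvPassFold_getElem? _ _ _ _ _ hlenB,
      pvPassFold_getElem? _ _ _ _ _ hlen0]
  by_cases hk : k < n.length
  · have hn : n[k]? = some (n[k]'hk) := List.getElem?_eq_getElem hk
    by_cases hA : n[k]'hk ∈ A
    · simp [hA, hn]
    · by_cases hB : n[k]'hk ∈ B <;> simp [hA, hB, hn, List.getElem?_replicate, hk]
  · have hn : n[k]? = none := List.getElem?_eq_none (by omega)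
    simp [hn, hk]
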